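-- pv_equiv track=rewrite | github.com/Pkansagra-hub/FamilyOS | affect/features/negation.py | negation_scope_multipliers
-- ===== SOURCE A (Python) =====
-- from typing import List
--
-- def negation_scope_multipliers(tokens: List[str], window: int = 3) -> List[int]:
--     """Return a list of multipliers (+1 / -1) indicating negation for each token.
--     A negation flips the sign for the next `window` tokens unless another clause boundary occurs.
--     """
--     multipliers = [1] * len(tokens)
--     neg_left = 0
--     for i, tok in enumerate(tokens):
--         lower = tok.lower()
--         if lower in {"not","no","never","aint","isnt","arent","dont","doesnt","didnt","cant","couldnt","wont","wouldnt","shouldnt"} or lower.endswith("n't"):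
--             neg_left = window
--             continue
--         if neg_left > 0:
--             multipliers[i] = -1
--             neg_left -= 1
--     return multipliers
-- ===== SOURCE B (Python) =====
-- from typing import List
--
-- _NEG_WORDS = {"not","no","never","aint","isnt","arent","dont","doesnt","didnt",
--               "cant","couldnt","wont","wouldnt","shouldnt"}
--
-- def _is_negation(tok: str) -> bool:
--     lower = tok.lower()
--     return lower in _NEG_WORDS or lower.endswith("n't")
--
-- def negation_scope_multipliers(tokens: List[str], window: int = 3) -> List[int]:
--     """Trigger-scan formulation: find each negation token, then mark the next
--     `window` non-negation tokens as -1 (negation tokens are skipped, never marked)."""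
--     mult = [1] * len(tokens)
--     n = len(tokens)
--     i = 0
--     while i < n:
--         if _is_negation(tokens[i]):
--             j = i + 1
--             budget = window
--             while j < n:
--                 if budget <= 0:
--                     break
--                 if _is_negation(tokens[j]):
--                     j += 1
--                 else:
--                     mult[j] = -1
--                     budget -= 1
--                     j += 1
--         i += 1
--     return mult
-- ===== Notes on version B (the rewrite author's own statement) =====
-- stated objective: alternative
-- what changed: A carries a mutable countdown (neg_left) through one pass and marks tokens lazily as the countdown runs; B has no countdown state: for each negation trigger it scans forward marking the next `window` non-negation tokens, overlapping windows naturally unioning.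
import Mathlib
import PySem

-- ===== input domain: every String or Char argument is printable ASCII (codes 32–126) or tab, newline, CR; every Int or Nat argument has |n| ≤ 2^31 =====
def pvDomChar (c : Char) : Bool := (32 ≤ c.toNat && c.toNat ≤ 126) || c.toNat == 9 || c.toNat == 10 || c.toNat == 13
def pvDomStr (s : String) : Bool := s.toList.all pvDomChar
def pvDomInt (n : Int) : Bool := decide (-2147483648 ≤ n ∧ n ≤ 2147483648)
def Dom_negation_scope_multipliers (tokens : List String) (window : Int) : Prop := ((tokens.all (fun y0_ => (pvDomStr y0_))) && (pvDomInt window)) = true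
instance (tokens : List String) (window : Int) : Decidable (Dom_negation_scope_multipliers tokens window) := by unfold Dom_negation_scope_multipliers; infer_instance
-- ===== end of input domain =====

-- B replaces A's countdown-state single pass by a per-trigger forward scan (alternative decomposition, same cost).

-- ===== PORT A =====
def pvNegWords : List String := ["not","no","never","aint","isnt","arent","dont","doesnt","didnt","cant","couldnt","wont","wouldnt","shouldnt"]

-- A's `for i, tok in enumerate(tokens)` loop with state (multipliers, neg_left)
def pvLoopA (tokens : List String) (window : Int) (i : Nat) (mult : List Int) (negLeft : Int) : List Int :=
  if h : i < tokens.length then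
    if pvNegWords.contains (PySem.Str.lower tokens[i]) || PySem.Str.endswith (PySem.Str.lower tokens[i]) "n't" then
      pvLoopA tokens window (i+1) mult window
    else if negLeft > 0 then
      pvLoopA tokens window (i+1) (mult.set i (-1)) (negLeft - 1)
    else
      pvLoopA tokens window (i+1) mult negLeft
  else mult
termination_by tokens.length - i

def negation_scope_multipliers (tokens : List String) (window : Int) : List Int :=
  pvLoopA tokens window 0 (List.replicate tokens.length 1) 0

-- ===== PORT B =====
def pvIsNeg (tok : String) : Bool :=
  let lower := PySem.Str.lower tok
  pvNegWords.contains lower || PySem.Str.endswith lower "n't"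

-- B's inner `while j < n` scan: mark the next `budget` non-negation tokens from j
def pvMarkFrom (tokens : List String) (mult : List Int) (j : Nat) (budget : Int) : List Int :=
  if h : j < tokens.length then
    if budget ≤ 0 then mult
    else if pvIsNeg tokens[j] then
      pvMarkFrom tokens mult (j+1) budget
    else
      pvMarkFrom tokens (mult.set j (-1)) (j+1) (budget - 1)
  else mult
termination_by tokens.length - j

-- B's outer `while i < n` loop
def pvLoopB (tokens : List String) (window : Int) (i : Nat) (mult : List Int) : List Int :=
  if h : i < tokens.length then
    if pvIsNeg tokens[i] then
      pvLoopB tokens window (i+1) (pvMarkFrom tokens mult (i+1) window)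
    else
      pvLoopB tokens window (i+1) mult
  else mult
termination_by tokens.length - i

def negation_scope_multipliers_alt (tokens : List String) (window : Int) : List Int :=
  pvLoopB tokens window 0 (List.replicate tokens.length 1)

-- ===== PRECONDITION & SPEC =====
def Spec_negation_scope_multipliers (tokens : List String) (window : Int) (out : List Int) : Prop := out = negation_scope_multipliers_alt tokens window
instance (tokens : List String) (window : Int) (out : List Int) : Decidable (Spec_negation_scope_multipliers tokens window out) := by unfold Spec_negation_scope_multipliers; infer_instance

-- ===== CLAIM (what is proved, stated in full; the proofs are below) =====
def Claim_equal_negation_scope_multipliers : Prop := ∀ (tokens : List String) (window : Int), Dom_negation_scope_multipliers tokens window → Spec_negation_scope_multipliers tokens window (negation_scope_multipliers tokens window)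

-- ===== LEMMAS AND PROOFS =====

theorem pvMarkFrom_oob (tokens : List String) (mult : List Int) (j : Nat) (budget : Int)
    (h : tokens.length ≤ j) : pvMarkFrom tokens mult j budget = mult := by
  rw [pvMarkFrom]; simp [Nat.not_lt.mpr h]

theorem pvMarkFrom_nonpos (tokens : List String) (mult : List Int) (j : Nat) (budget : Int)
    (h : budget ≤ 0) : pvMarkFrom tokens mult j budget = mult := by
  rw [pvMarkFrom]; split_ifs <;> simp_all

-- marking from j only touches indices ≥ j, so it commutes with a set at i < j
theorem pvMarkFrom_set_comm (tokens : List String) (mult : List Int) (j : Nat) (budget : Int)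
    (i : Nat) (v : Int) (hij : i < j) :
    pvMarkFrom tokens (mult.set i v) j budget = (pvMarkFrom tokens mult j budget).set i v := by
  by_cases h1 : j < tokens.length
  · by_cases h2 : budget ≤ 0
    · rw [pvMarkFrom_nonpos _ _ _ _ h2, pvMarkFrom_nonpos _ _ _ _ h2]
    · by_cases h3 : pvIsNeg tokens[j]
      · have e : ∀ m : List Int, pvMarkFrom tokens m j budget = pvMarkFrom tokens m (j+1) budget := by
          intro m; rw [pvMarkFrom]; simp [h1, h2, h3]
        rw [e, e]
        exact pvMarkFrom_set_comm tokens mult (j+1) budget i v (Nat.lt_succ_of_lt hij)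
      · have e : ∀ m : List Int, pvMarkFrom tokens m j budget = pvMarkFrom tokens (m.set j (-1)) (j+1) (budget-1) := by
          intro m; rw [pvMarkFrom]; simp [h1, h2, h3]
        rw [e, e, List.set_comm v (-1) (Nat.ne_of_lt hij)]
        exact pvMarkFrom_set_comm tokens (mult.set j (-1)) (j+1) (budget-1) i v (Nat.lt_succ_of_lt hij)
  · rw [pvMarkFrom_oob _ _ _ _ (Nat.not_lt.mp h1), pvMarkFrom_oob _ _ _ _ (Nat.not_lt.mp h1)]
termination_by tokens.length - j

-- a smaller-budget marking from the same start is absorbed by a larger-budget one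
theorem pvMarkFrom_absorb (tokens : List String) (mult : List Int) (j : Nat) (b1 b2 : Int)
    (hb : b1 ≤ b2) :
    pvMarkFrom tokens (pvMarkFrom tokens mult j b1) j b2 = pvMarkFrom tokens mult j b2 := by
  by_cases hj : j < tokens.length
  · by_cases h1 : b1 ≤ 0
    · rw [pvMarkFrom_nonpos tokens mult j b1 h1]
    · have h2 : ¬ b2 ≤ 0 := by omega
      by_cases hneg : pvIsNeg tokens[j]
      · have e1 : ∀ (m : List Int) (b : Int), ¬ b ≤ 0 → pvMarkFrom tokens m j b = pvMarkFrom tokens m (j+1) b := by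
          intro m b hb0; rw [pvMarkFrom]; simp [hj, hb0, hneg]
        rw [e1 _ _ h1, e1 _ _ h2, e1 _ _ h2]
        exact pvMarkFrom_absorb tokens mult (j+1) b1 b2 hb
      · have e1 : ∀ (m : List Int) (b : Int), ¬ b ≤ 0 → pvMarkFrom tokens m j b = pvMarkFrom tokens (m.set j (-1)) (j+1) (b-1) := by
          intro m b hb0; rw [pvMarkFrom]; simp [hj, hb0, hneg]
        rw [e1 _ _ h1, e1 _ _ h2, e1 _ _ h2,
            ← pvMarkFrom_set_comm tokens (mult.set j (-1)) (j+1) (b1-1) j (-1) (Nat.lt_succ_self j),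
            List.set_set]
        exact pvMarkFrom_absorb tokens (mult.set j (-1)) (j+1) (b1-1) (b2-1) (by omega)
  · rw [pvMarkFrom_oob tokens mult j b1 (Nat.not_lt.mp hj)]
termination_by tokens.length - j

-- main invariant: A's loop state equals B's loop with the pending marks applied
theorem pvLoop_agree (tokens : List String) (window : Int) (i : Nat) (mult : List Int)
    (negLeft : Int) (hn : negLeft ≤ window ∨ negLeft ≤ 0) :
    pvLoopA tokens window i mult negLeft
      = pvLoopB tokens window i (pvMarkFrom tokens mult i negLeft) := by
  by_cases hi : i < tokens.length
  · by_cases hneg : pvIsNeg tokens[i]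
    · have hneg' : (pvNegWords.contains (PySem.Str.lower tokens[i]) || PySem.Str.endswith (PySem.Str.lower tokens[i]) "n't") = true := hneg
      have eA : pvLoopA tokens window i mult negLeft = pvLoopA tokens window (i+1) mult window := by
        rw [pvLoopA, dif_pos hi, if_pos hneg']
      have eB : ∀ m : List Int, pvLoopB tokens window i m = pvLoopB tokens window (i+1) (pvMarkFrom tokens m (i+1) window) := by
        intro m; rw [pvLoopB]; simp [hi, hneg]
      have key : pvMarkFrom tokens (pvMarkFrom tokens mult i negLeft) (i+1) window
          = pvMarkFrom tokens mult (i+1) window := by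
        by_cases h0 : negLeft ≤ 0
        · rw [pvMarkFrom_nonpos tokens mult i negLeft h0]
        · have e : pvMarkFrom tokens mult i negLeft = pvMarkFrom tokens mult (i+1) negLeft := by
            rw [pvMarkFrom]; simp [hi, h0, hneg]
          rw [e]
          exact pvMarkFrom_absorb tokens mult (i+1) negLeft window (by omega)
      rw [eA, eB, key]
      exact pvLoop_agree tokens window (i+1) mult window (Or.inl le_rfl)
    · have hneg' : (pvNegWords.contains (PySem.Str.lower tokens[i]) || PySem.Str.endswith (PySem.Str.lower tokens[i]) "n't") = false := by
        simpa [pvIsNeg] using hneg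
      have eB : ∀ m : List Int, pvLoopB tokens window i m = pvLoopB tokens window (i+1) m := by
        intro m; rw [pvLoopB]; simp [hi, hneg]
      by_cases hpos : negLeft > 0
      · have eA : pvLoopA tokens window i mult negLeft = pvLoopA tokens window (i+1) (mult.set i (-1)) (negLeft - 1) := by
          rw [pvLoopA, dif_pos hi, if_neg (by rw [hneg']; simp), if_pos hpos]
        have e : pvMarkFrom tokens mult i negLeft = pvMarkFrom tokens (mult.set i (-1)) (i+1) (negLeft - 1) := by
          rw [pvMarkFrom]; simp [hi, show ¬ negLeft ≤ 0 by omega, hneg]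
        rw [eA, eB, e]
        exact pvLoop_agree tokens window (i+1) (mult.set i (-1)) (negLeft-1) (by omega)
      · have eA : pvLoopA tokens window i mult negLeft = pvLoopA tokens window (i+1) mult negLeft := by
          rw [pvLoopA, dif_pos hi, if_neg (by rw [hneg']; simp), if_neg hpos]
        rw [eA, eB, pvMarkFrom_nonpos tokens mult i negLeft (by omega),
            pvLoop_agree tokens window (i+1) mult negLeft hn,
            pvMarkFrom_nonpos tokens mult (i+1) negLeft (by omega)]
  · rw [pvLoopA, dif_neg hi, pvLoopB, dif_neg hi, pvMarkFrom_oob _ _ _ _ (Nat.not_lt.mp hi)]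
termination_by tokens.length - i

-- ===== VERDICT (by name: the statement is the Claim_ definition above) =====
theorem negation_scope_multipliers_spec : Claim_equal_negation_scope_multipliers := by
  intro tokens window _
  unfold Spec_negation_scope_multipliers negation_scope_multipliers negation_scope_multipliers_alt
  rw [pvLoop_agree tokens window 0 (List.replicate tokens.length 1) 0 (Or.inr le_rfl),
      pvMarkFrom_nonpos _ _ _ _ le_rfl]
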